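-- pv_equiv track=rewrite | github.com/kongusen/AutoReportAI | backend/app/services/template/agent_sql_analysis_service.py | _find_similar_table
-- ===== SOURCE A (Python) =====
-- from typing import Dict, Any, List, Optional, Tuple
--
-- def _find_similar_table(target_table: str, available_tables: List[str]) -> str:
--     """查找最相似的表名"""
--     target_lower = target_table.lower()
--
--     # 精确匹配
--     for table in available_tables:
--         if table.lower() == target_lower:
--             return table
--
--     # 包含匹配
--     for table in available_tables:
--         if target_lower in table.lower() or table.lower() in target_lower:
--             return table
--
--     # 返回第一个可用表作为默认值
--     return available_tables[0] if available_tables else "default_table"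
-- ===== SOURCE B (Python) =====
-- def _find_similar_table(target_table, available_tables):
--     """One pass: exact match returns immediately; first containment hit is remembered."""
--     target_lower = target_table.lower()
--     first_contain = None
--     for table in available_tables:
--         table_lower = table.lower()
--         if table_lower == target_lower:
--             return table
--         if first_contain is None and (target_lower in table_lower or table_lower in target_lower):
--             first_contain = table
--     if first_contain is not None:
--         return first_contain
--     return available_tables[0] if available_tables else "default_table"
-- ===== Notes on version B (the rewrite author's own statement) =====
-- stated objective: alternative
-- what changed: Replaces A's two sequential scans (exact-match scan, then containment scan) by a single pass that returns on an exact match and remembers the first containment hit in one state variable, with the same defaults.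
import Mathlib
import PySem

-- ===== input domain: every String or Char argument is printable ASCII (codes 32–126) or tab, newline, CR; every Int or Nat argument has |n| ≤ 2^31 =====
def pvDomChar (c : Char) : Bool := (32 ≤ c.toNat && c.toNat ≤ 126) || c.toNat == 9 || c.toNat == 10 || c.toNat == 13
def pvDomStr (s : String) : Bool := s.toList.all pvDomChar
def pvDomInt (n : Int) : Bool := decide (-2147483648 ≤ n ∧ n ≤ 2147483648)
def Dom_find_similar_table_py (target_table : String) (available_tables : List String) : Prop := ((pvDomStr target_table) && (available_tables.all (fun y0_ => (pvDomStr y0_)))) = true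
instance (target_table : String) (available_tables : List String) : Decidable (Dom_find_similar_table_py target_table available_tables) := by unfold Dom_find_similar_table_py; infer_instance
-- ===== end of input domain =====

-- B is a single pass (exact match returns at once, first containment hit is remembered)
-- instead of A's two sequential scans; objective: alternative decomposition, same cost.

-- ===== PORT A =====
-- A: first loop = first table whose lowercase equals target_lower; second loop =
-- first table whose lowercase contains / is contained in target_lower; else default.
def find_similar_table_py (target_table : String) (available_tables : List String) : String :=
  let target_lower := PySem.Str.lower target_table
  match available_tables.find? (fun table => PySem.Str.lower table == target_lower) with
  | some table => table
  | none =>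
    match available_tables.find? (fun table =>
        PySem.Str.isIn target_lower (PySem.Str.lower table) ||
        PySem.Str.isIn (PySem.Str.lower table) target_lower) with
    | some table => table
    | none =>
      match available_tables with
      | [] => "default_table"
      | x :: _ => x

-- ===== PORT B =====
-- B's loop: walks the list once, carrying first_contain; returns some on exact match
-- or, at the end, first_contain (none = fall through to the default).
def pvAltLoop (target_lower : String) (first_contain : Option String) :
    List String → Option String
  | [] => first_contain
  | table :: rest =>
    let table_lower := PySem.Str.lower table
    if table_lower == target_lower then some table
    else if first_contain.isNone &&
        (PySem.Str.isIn target_lower table_lower ||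
         PySem.Str.isIn table_lower target_lower) then
      pvAltLoop target_lower (some table) rest
    else
      pvAltLoop target_lower first_contain rest

def find_similar_table_py_alt (target_table : String) (available_tables : List String) : String :=
  let target_lower := PySem.Str.lower target_table
  match pvAltLoop target_lower none available_tables with
  | some r => r
  | none =>
    match available_tables with
    | [] => "default_table"
    | x :: _ => x

-- ===== PRECONDITION & SPEC =====
def Spec_find_similar_table_py (target_table : String) (available_tables : List String) (out : String) : Prop := out = find_similar_table_py_alt target_table available_tables
instance (target_table : String) (available_tables : List String) (out : String) : Decidable (Spec_find_similar_table_py target_table available_tables out) := by unfold Spec_find_similar_table_py; infer_instance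

-- ===== CLAIM (what is proved, stated in full; the proofs are below) =====
def Claim_equal_find_similar_table_py : Prop := ∀ (target_table : String) (available_tables : List String), Dom_find_similar_table_py target_table available_tables → Spec_find_similar_table_py target_table available_tables (find_similar_table_py target_table available_tables)

-- ===== LEMMAS AND PROOFS =====

-- B's single pass computes: first exact match if any, else the carried accumulator
-- if set, else the first containment match — exactly A's two find? scans.
theorem pvAltLoop_eq (target_lower : String) (ts : List String) (acc : Option String) :
    pvAltLoop target_lower acc ts =
      match ts.find? (fun table => PySem.Str.lower table == target_lower) with
      | some table => some table
      | none =>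
        match acc with
        | some a => some a
        | none => ts.find? (fun table =>
            PySem.Str.isIn target_lower (PySem.Str.lower table) ||
            PySem.Str.isIn (PySem.Str.lower table) target_lower) := by
  induction ts generalizing acc with
  | nil => cases acc <;> simp [pvAltLoop]
  | cons table rest ih =>
    simp only [pvAltLoop, List.find?]
    by_cases hp : (PySem.Str.lower table == target_lower) = true
    · simp [hp]
    · simp only [hp, Bool.false_eq_true, if_false]
      by_cases hq : (PySem.Str.isIn target_lower (PySem.Str.lower table) ||
          PySem.Str.isIn (PySem.Str.lower table) target_lower) = true
      · cases acc with
        | none =>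
          simp only [Option.isNone_none, hq, Bool.true_and, if_true, ih]
        | some a =>
          simp only [Option.isNone_some, Bool.false_and, Bool.false_eq_true, if_false, ih]
      · simp only [hq, Bool.and_false, Bool.false_eq_true, if_false, ih]

-- ===== VERDICT (by name: the statement is the Claim_ definition above) =====
theorem find_similar_table_py_spec : Claim_equal_find_similar_table_py := by
  intro target_table available_tables _
  unfold Spec_find_similar_table_py
  simp only [find_similar_table_py, find_similar_table_py_alt, pvAltLoop_eq]
  cases available_tables.find? (fun table =>
      PySem.Str.lower table == PySem.Str.lower target_table) <;> simp
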